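-- pv_equiv track=rewrite | github.com/ykkwon18/plan2code-multiagent-harness | docs/scripts/close_task.py | _rewrite_review_paths
-- ===== SOURCE A (Python) =====
-- def _rewrite_review_paths(body: str, task_id: str) -> str:
--     """body 내 old review 경로를 catalog 내부 상대경로로 재작성.
--
--     Suffix-있는 경우 (파일 링크):
--         `docs/plan-task/review/<id>/r1.md` → `review/r1.md`
--         `plan-task/review/<id>/r1.md`      → `review/r1.md`
--         `../plan-task/review/<id>/r1.md`   → `review/r1.md`
--
--     Suffix-없는 경우 (디렉토리 참조):
--         `docs/plan-task/review/<id>` → `review`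
--         `plan-task/review/<id>`      → `review`
--         `../plan-task/review/<id>`   → `review`
--
--     Round 3에서 참조하는 이전 라운드 파일 링크 등 body에 박힌 절대·상대경로를
--     close 시점에 일괄 정리. 의미 변경 없는 mechanical rewrite.
--
--     주의: `../user_inbox/...` 같은 **review 밖 relative link**는 plan-task(`docs/plan-task/<id>.md`)
--     기준이었던 것이 catalog(`docs/catalog/<id>/<id>.md`)로 옮겨가면서 한 레벨 더 깊어져
--     의미가 바뀐다. 자동 재작성은 위험하므로 여기선 건드리지 않고, apply()에서 warn만 띄운다.
--     """
--     # 순서 중요: `plan-task/review/<id>/`는 `docs/plan-task/review/<id>/` 및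
--     # `../plan-task/review/<id>/`의 substring이므로 가장 마지막에 돌려야
--     # 앞 두 변형이 먼저 완전 치환된다. 안 그러면 `../plan-task/.../...`에서
--     # 내부 substring이 먼저 치환돼 `../review/...`가 남는다.
--     for with_slash in (
--         f"docs/plan-task/review/{task_id}/",
--         f"../plan-task/review/{task_id}/",
--         f"plan-task/review/{task_id}/",
--     ):
--         body = body.replace(with_slash, "review/")
--     for bare in (
--         f"docs/plan-task/review/{task_id}",
--         f"../plan-task/review/{task_id}",
--         f"plan-task/review/{task_id}",
--     ):
--         body = body.replace(bare, "review")
--     return body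
-- ===== SOURCE B (Python) =====
-- def _rewrite_review_paths(body: str, task_id: str) -> str:
--     # Each rewrite tokenizes the text into the fragment list text.split(pattern)
--     # and reassembles it with the replacement as the joiner; the rule order is
--     # semantically forced (replacements can cascade into later patterns), so the
--     # rules are applied by a recursion over a generated rule table.
--     tail = "plan-task/review/" + task_id
--     rules = [(pre, sep) for sep in ("/", "") for pre in ("docs/", "../", "")]
--
--     def go(text, rules):
--         if not rules:
--             return text
--         (pre, sep) = rules[0]
--         return go(("review" + sep).join(text.split(pre + tail + sep)), rules[1:])
--
--     return go(body, rules)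
-- ===== Notes on version B (the rewrite author's own statement) =====
-- stated objective: alternative
-- what changed: Each rewrite now tokenizes the text into the fragment list text.split(pattern) and reassembles it with str.join using the replacement as the joiner, driven by a recursion over a comprehension-generated rule table, instead of A's two loops of in-place str.replace; the rule ORDER is kept because A's replacements can cascade into later patterns, so only orderings, not the order, are free.
import Mathlib
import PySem

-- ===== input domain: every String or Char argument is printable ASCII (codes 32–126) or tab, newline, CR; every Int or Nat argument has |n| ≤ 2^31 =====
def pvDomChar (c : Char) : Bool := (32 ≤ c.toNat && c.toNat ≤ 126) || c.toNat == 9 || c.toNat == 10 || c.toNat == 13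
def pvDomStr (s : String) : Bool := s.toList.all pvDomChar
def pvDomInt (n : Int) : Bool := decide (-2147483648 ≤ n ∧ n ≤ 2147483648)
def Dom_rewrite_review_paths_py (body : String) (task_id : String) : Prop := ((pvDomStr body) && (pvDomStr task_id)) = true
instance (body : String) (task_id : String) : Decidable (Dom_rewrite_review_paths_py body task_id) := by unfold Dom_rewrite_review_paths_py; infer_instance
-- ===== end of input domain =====

-- B rewrites each pattern by split-into-fragments + join-with-replacement over a
-- generated rule table applied by recursion (objective: alternative mechanism, same
-- cost; the rule order is kept because replacements can cascade into later patterns);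
-- return values proved equal on all inputs.

-- ===== PORT A =====
def rewrite_review_paths_py (body : String) (task_id : String) : String :=
  let body1 :=
    ["docs/plan-task/review/" ++ task_id ++ "/",
     "../plan-task/review/" ++ task_id ++ "/",
     "plan-task/review/" ++ task_id ++ "/"].foldl
      (fun b w => PySem.Str.replace b w "review/") body
  ["docs/plan-task/review/" ++ task_id,
   "../plan-task/review/" ++ task_id,
   "plan-task/review/" ++ task_id].foldl
    (fun b w => PySem.Str.replace b w "review") body1

-- ===== PORT B =====
-- Source B's `("review"+sep).join(text.split(pre+tail+sep))`; the separator is never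
-- empty here (it contains "plan-task/review/"), so text.split(sep) is Chars.splitOn
def pvSubst (text old new : String) : String :=
  String.ofList (PySem.Chars.join new.toList (PySem.Chars.splitOn text.toList old.toList))

-- Source B's recursive `go` over the remaining rules
def pvRewriteGo (tail : String) : List (String × String) → String → String
  | [], text => text
  | (pre, sep) :: rs, text =>
      pvRewriteGo tail rs (pvSubst text (pre ++ tail ++ sep) ("review" ++ sep))

def rewrite_review_paths_py_alt (body : String) (task_id : String) : String :=
  let tail := "plan-task/review/" ++ task_id
  let rules := ["/", ""].flatMap (fun sep => ["docs/", "../", ""].map (fun pre => (pre, sep)))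
  pvRewriteGo tail rules body

-- ===== PRECONDITION & SPEC =====
def Spec_rewrite_review_paths_py (body : String) (task_id : String) (out : String) : Prop := out = rewrite_review_paths_py_alt body task_id
instance (body : String) (task_id : String) (out : String) : Decidable (Spec_rewrite_review_paths_py body task_id out) := by unfold Spec_rewrite_review_paths_py; infer_instance

-- ===== CLAIM (what is proved, stated in full; the proofs are below) =====
def Claim_equal_rewrite_review_paths_py : Prop := ∀ (body : String) (task_id : String), Dom_rewrite_review_paths_py body task_id → Spec_rewrite_review_paths_py body task_id (rewrite_review_paths_py body task_id)

-- ===== LEMMAS AND PROOFS =====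

-- clean equation lemmas for PySem.Chars.replace.go
theorem pvGo0 (old new l acc : List Char) :
    PySem.Chars.replace.go old new 0 l acc = acc.reverse ++ l := by
  rw [PySem.Chars.replace.go]

theorem pvGoNil (old new acc : List Char) (f : Nat) :
    PySem.Chars.replace.go old new (f+1) [] acc = acc.reverse := by
  rw [PySem.Chars.replace.go]; omega

theorem pvGoCons (old new acc : List Char) (f : Nat) (c : Char) (t : List Char) :
    PySem.Chars.replace.go old new (f+1) (c :: t) acc =
      (if old.isPrefixOf (c :: t) then PySem.Chars.replace.go old new f ((c :: t).drop old.length) (new.reverse ++ acc)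
       else PySem.Chars.replace.go old new f t (c :: acc)) := by
  rw [PySem.Chars.replace.go]

theorem pvGoAcc (old new : List Char) (fuel : Nat) : ∀ (l acc : List Char),
    PySem.Chars.replace.go old new fuel l acc = acc.reverse ++ PySem.Chars.replace.go old new fuel l [] := by
  induction fuel with
  | zero => intro l acc; simp [pvGo0]
  | succ f ih =>
    intro l acc
    cases l with
    | nil => simp [pvGoNil]
    | cons c t =>
      rw [pvGoCons, pvGoCons]
      split
      · rw [ih ((c :: t).drop old.length) (new.reverse ++ acc),
            ih ((c :: t).drop old.length) (new.reverse ++ [])]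
        simp
      · rw [ih t (c :: acc), ih t (c :: [])]; simp

theorem pvGoFuel (old new : List Char) (hold : old ≠ []) (fuel : Nat) :
    ∀ (fuel' : Nat) (l : List Char), l.length ≤ fuel → l.length ≤ fuel' →
    PySem.Chars.replace.go old new fuel l [] = PySem.Chars.replace.go old new fuel' l [] := by
  induction fuel with
  | zero =>
    intro fuel' l hl _
    have hl0 : l = [] := List.eq_nil_of_length_eq_zero (by omega)
    subst hl0
    cases fuel' with
    | zero => rfl
    | succ f' => rw [pvGo0, pvGoNil]; rfl
  | succ f ih =>
    intro fuel' l hl hl'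
    cases l with
    | nil =>
      cases fuel' with
      | zero => rw [pvGo0, pvGoNil]; rfl
      | succ f' => rw [pvGoNil, pvGoNil]
    | cons c t =>
      cases fuel' with
      | zero => simp at hl'
      | succ f' =>
        have h1 : 1 ≤ old.length := by
          cases old with | nil => exact absurd rfl hold | cons _ _ => simp
        simp only [List.length_cons] at hl hl'
        rw [pvGoCons, pvGoCons]
        split
        · rw [pvGoAcc old new f, pvGoAcc old new f']
          rw [ih f' ((c :: t).drop old.length) (by simp; omega) (by simp; omega)]
        · rw [pvGoAcc old new f, pvGoAcc old new f']
          rw [ih f' t (by omega) (by omega)]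

theorem pvReplaceNil (old new : List Char) (hold : old ≠ []) :
    PySem.Chars.replace [] old new = [] := by
  have hie : old.isEmpty = false := by simp [hold]
  simp only [PySem.Chars.replace, hie, Bool.false_eq_true, if_false, List.length_nil, pvGo0,
    List.reverse_nil, List.append_nil]

theorem pvReplaceCons (old new : List Char) (hold : old ≠ []) (c : Char) (t : List Char) :
    PySem.Chars.replace (c :: t) old new =
      (if old.isPrefixOf (c :: t) then new ++ PySem.Chars.replace ((c :: t).drop old.length) old new
       else c :: PySem.Chars.replace t old new) := by
  have h1 : 1 ≤ old.length := by
    cases old with | nil => exact absurd rfl hold | cons _ _ => simp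
  have hie : old.isEmpty = false := by simp [hold]
  simp only [PySem.Chars.replace, hie, Bool.false_eq_true, if_false, List.length_cons, pvGoCons]
  split
  · rw [pvGoAcc old new t.length,
        pvGoFuel old new hold t.length ((c :: t).drop old.length).length _ (by simp; omega) le_rfl]
    simp
  · rw [pvGoAcc old new t.length]; rfl

-- clean equation lemmas for PySem.Chars.splitOn.go
theorem pvS0 (sep l cur : List Char) (acc : List (List Char)) :
    PySem.Chars.splitOn.go sep 0 l cur acc = ((cur.reverse ++ l) :: acc).reverse := by
  rw [PySem.Chars.splitOn.go]

theorem pvSNil (sep cur : List Char) (acc : List (List Char)) (f : Nat) :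
    PySem.Chars.splitOn.go sep (f+1) [] cur acc = (cur.reverse :: acc).reverse := by
  rw [PySem.Chars.splitOn.go]; omega

theorem pvSCons (sep cur : List Char) (acc : List (List Char)) (f : Nat) (c : Char) (t : List Char) :
    PySem.Chars.splitOn.go sep (f+1) (c :: t) cur acc =
      (if sep.isPrefixOf (c :: t) then
        PySem.Chars.splitOn.go sep f ((c :: t).drop sep.length) [] (cur.reverse :: acc)
       else PySem.Chars.splitOn.go sep f t (c :: cur) acc) := by
  rw [PySem.Chars.splitOn.go]

-- replace the first fragment of the split (Source B's current-piece accumulator)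
def pvMapHead (f : List Char → List Char) : List (List Char) → List (List Char)
  | [] => []
  | h :: t => f h :: t

theorem pvSAcc (sep : List Char) (fuel : Nat) : ∀ (l cur : List Char) (acc : List (List Char)),
    PySem.Chars.splitOn.go sep fuel l cur acc = acc.reverse ++ PySem.Chars.splitOn.go sep fuel l cur [] := by
  induction fuel with
  | zero => intro l cur acc; simp [pvS0]
  | succ f ih =>
    intro l cur acc
    cases l with
    | nil => simp [pvSNil]
    | cons c t =>
      rw [pvSCons, pvSCons]
      split
      · rw [ih ((c :: t).drop sep.length) [] (cur.reverse :: acc),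
            ih ((c :: t).drop sep.length) [] (cur.reverse :: [])]
        simp
      · rw [ih t (c :: cur) acc, ih t (c :: cur) []]

theorem pvSCur (sep : List Char) (fuel : Nat) : ∀ (l cur : List Char),
    PySem.Chars.splitOn.go sep fuel l cur [] =
      pvMapHead (cur.reverse ++ ·) (PySem.Chars.splitOn.go sep fuel l [] []) := by
  induction fuel with
  | zero => intro l cur; simp [pvS0, pvMapHead]
  | succ f ih =>
    intro l cur
    cases l with
    | nil => simp [pvSNil, pvMapHead]
    | cons c t =>
      rw [pvSCons, pvSCons]
      split
      · rw [pvSAcc sep f _ _ (cur.reverse :: []), pvSAcc sep f _ _ ([List.reverse []])]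
        simp [pvMapHead]
      · rw [ih t (c :: cur), ih t (c :: [])]
        cases PySem.Chars.splitOn.go sep f t [] [] with
        | nil => simp [pvMapHead]
        | cons h tl => simp [pvMapHead]

theorem pvSFuel (sep : List Char) (hsep : sep ≠ []) (fuel : Nat) :
    ∀ (fuel' : Nat) (l : List Char), l.length ≤ fuel → l.length ≤ fuel' →
    PySem.Chars.splitOn.go sep fuel l [] [] = PySem.Chars.splitOn.go sep fuel' l [] [] := by
  induction fuel with
  | zero =>
    intro fuel' l hl _
    have hl0 : l = [] := List.eq_nil_of_length_eq_zero (by omega)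
    subst hl0
    cases fuel' with
    | zero => rfl
    | succ f' => rw [pvS0, pvSNil]; simp
  | succ f ih =>
    intro fuel' l hl hl'
    cases l with
    | nil =>
      cases fuel' with
      | zero => rw [pvS0, pvSNil]; simp
      | succ f' => rw [pvSNil, pvSNil]
    | cons c t =>
      cases fuel' with
      | zero => simp at hl'
      | succ f' =>
        have h1 : 1 ≤ sep.length := by
          cases sep with | nil => exact absurd rfl hsep | cons _ _ => simp
        simp only [List.length_cons] at hl hl'
        rw [pvSCons, pvSCons]
        split
        · rw [pvSAcc sep f, pvSAcc sep f']
          rw [ih f' ((c :: t).drop sep.length) (by simp; omega) (by simp; omega)]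
        · rw [pvSCur sep f, pvSCur sep f']
          rw [ih f' t (by omega) (by omega)]

-- structural recurrence for splitOn (sep non-empty)
theorem pvSplitOnNil (sep : List Char) :
    PySem.Chars.splitOn [] sep = [[]] := by
  rw [PySem.Chars.splitOn, pvSNil]; rfl

theorem pvSplitOnCons (sep : List Char) (hsep : sep ≠ []) (c : Char) (t : List Char) :
    PySem.Chars.splitOn (c :: t) sep =
      (if sep.isPrefixOf (c :: t) then [] :: PySem.Chars.splitOn ((c :: t).drop sep.length) sep
       else pvMapHead (c :: ·) (PySem.Chars.splitOn t sep)) := by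
  have h1 : 1 ≤ sep.length := by
    cases sep with | nil => exact absurd rfl hsep | cons _ _ => simp
  rw [PySem.Chars.splitOn, List.length_cons, pvSCons]
  split
  · rw [pvSAcc sep (t.length + 1), PySem.Chars.splitOn,
        pvSFuel sep hsep (t.length + 1) (((c :: t).drop sep.length).length + 1) _
          (by simp only [List.length_drop, List.length_cons]; omega) (by omega)]
    simp
  · rw [pvSCur sep (t.length + 1), PySem.Chars.splitOn,
        pvSFuel sep hsep (t.length + 1) (t.length + 1) t (by omega) (by omega)]
    rfl

theorem pvSGo_ne_nil (sep : List Char) (fuel : Nat) : ∀ (l cur : List Char) (acc : List (List Char)),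
    PySem.Chars.splitOn.go sep fuel l cur acc ≠ [] := by
  induction fuel with
  | zero => intro l cur acc; rw [pvS0]; simp
  | succ f ih =>
    intro l cur acc
    cases l with
    | nil => rw [pvSNil]; simp
    | cons c t =>
      rw [pvSCons]
      split
      · exact ih _ _ _
      · exact ih _ _ _

theorem pvSplitOn_ne_nil (sep : List Char) (_hsep : sep ≠ []) (s : List Char) :
    PySem.Chars.splitOn s sep ≠ [] := by
  rw [PySem.Chars.splitOn]; exact pvSGo_ne_nil sep _ s [] []

theorem pvJoinMapHeadCons (new : List Char) (c : Char) (ps : List (List Char)) (hps : ps ≠ []) :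
    PySem.Chars.join new (pvMapHead (c :: ·) ps) = c :: PySem.Chars.join new ps := by
  cases ps with
  | nil => exact absurd rfl hps
  | cons h tl =>
    cases tl with
    | nil => simp [pvMapHead, PySem.Chars.join, List.intercalate]
    | cons h2 tl2 =>
      simp [pvMapHead, PySem.Chars.join, List.intercalate]

-- the heart: join-with-new over split-on-old IS Python's str.replace (old non-empty)
theorem pvJoinSplitAux (old new : List Char) (hold : old ≠ []) :
    ∀ (n : Nat) (s : List Char), s.length ≤ n →
    PySem.Chars.join new (PySem.Chars.splitOn s old) = PySem.Chars.replace s old new := by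
  intro n
  induction n with
  | zero =>
    intro s hs
    have hs0 : s = [] := List.eq_nil_of_length_eq_zero (by omega)
    subst hs0
    rw [pvSplitOnNil, pvReplaceNil old new hold]
    simp [PySem.Chars.join, List.intercalate]
  | succ n ih =>
    intro s hs
    cases s with
    | nil =>
      rw [pvSplitOnNil, pvReplaceNil old new hold]
      simp [PySem.Chars.join, List.intercalate]
    | cons c t =>
      have hlen : 1 ≤ old.length := by
        cases old with | nil => exact absurd rfl hold | cons _ _ => simp
      simp only [List.length_cons] at hs
      rw [pvSplitOnCons old hold, pvReplaceCons old new hold]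
      split
      · have hne := pvSplitOn_ne_nil old hold ((c :: t).drop old.length)
        cases hsp : PySem.Chars.splitOn ((c :: t).drop old.length) old with
        | nil => exact absurd hsp hne
        | cons h tl =>
          have := ih ((c :: t).drop old.length) (by simp only [List.length_drop, List.length_cons]; omega)
          rw [hsp] at this
          simp only [PySem.Chars.join, List.intercalate] at this ⊢
          simp only [List.intersperse]
          rw [← this]
          cases tl <;> simp [List.intersperse]
      · rw [pvJoinMapHeadCons new c _ (pvSplitOn_ne_nil old hold t)]
        rw [ih t (by omega)]

theorem pvSubst_eq (s old new : String) (hold : old.toList ≠ []) :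
    pvSubst s old new = PySem.Str.replace s old new := by
  rw [pvSubst, PySem.Str.replace]
  rw [pvJoinSplitAux old.toList new.toList hold s.toList.length s.toList le_rfl]

theorem pvAppend_toList_ne (x y : String) (hx : x.toList ≠ []) : (x ++ y).toList ≠ [] := by
  simp only [String.toList_append]
  simp [hx]

-- ===== VERDICT (by name: the statement is the Claim_ definition above) =====
theorem rewrite_review_paths_py_spec : Claim_equal_rewrite_review_paths_py := by
  intro body task_id _
  unfold Spec_rewrite_review_paths_py rewrite_review_paths_py rewrite_review_paths_py_alt
  simp only [List.flatMap, List.map, List.flatten, List.append_eq, List.cons_append,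
    List.nil_append, List.append_nil, List.foldl, pvRewriteGo]
  have hdocs : ("docs/" : String) ++ ("plan-task/review/" ++ task_id) = "docs/plan-task/review/" ++ task_id := by
    rw [← String.append_assoc]; rfl
  have hdd : ("../" : String) ++ ("plan-task/review/" ++ task_id) = "../plan-task/review/" ++ task_id := by
    rw [← String.append_assoc]; rfl
  have hre : ("review" : String) ++ "/" = "review/" := rfl
  have hb : ∀ s : String, ("" : String) ++ s = s := fun s => by simp
  have hnil : ∀ s : String, s ++ ("" : String) = s := fun s => by simp
  rw [hdocs, hdd, hb, hnil, hnil, hnil, hnil, hre]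
  have h1 : (("docs/plan-task/review/" : String) ++ task_id ++ "/").toList ≠ [] :=
    pvAppend_toList_ne _ _ (pvAppend_toList_ne _ _ (by decide))
  have h2 : (("../plan-task/review/" : String) ++ task_id ++ "/").toList ≠ [] :=
    pvAppend_toList_ne _ _ (pvAppend_toList_ne _ _ (by decide))
  have h3 : (("plan-task/review/" : String) ++ task_id ++ "/").toList ≠ [] :=
    pvAppend_toList_ne _ _ (pvAppend_toList_ne _ _ (by decide))
  have h4 : (("docs/plan-task/review/" : String) ++ task_id).toList ≠ [] :=
    pvAppend_toList_ne _ _ (by decide)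
  have h5 : (("../plan-task/review/" : String) ++ task_id).toList ≠ [] :=
    pvAppend_toList_ne _ _ (by decide)
  have h6 : (("plan-task/review/" : String) ++ task_id).toList ≠ [] :=
    pvAppend_toList_ne _ _ (by decide)
  rw [pvSubst_eq _ _ _ h1, pvSubst_eq _ _ _ h2, pvSubst_eq _ _ _ h3,
      pvSubst_eq _ _ _ h4, pvSubst_eq _ _ _ h5, pvSubst_eq _ _ _ h6]
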